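-- pv_equiv track=rewrite | github.com/epayet/KataRomanNumerals | kata/roman_letters.py | get_current_step
-- ===== SOURCE A (Python) =====
-- steps = [0, 5, 10, 50, 100, 500, 1000]
--
-- def get_current_step(number):
--     for step in steps:
--         i = steps.index(step)
--         if step > number:
--             return i - 1
--         elif step == number:
--             return i
--     return len(steps) - 1
-- ===== SOURCE B (Python) =====
-- import bisect
--
-- steps = [0, 5, 10, 50, 100, 500, 1000]
--
-- def get_current_step(number):
--     return bisect.bisect_right(steps, number) - 1
-- ===== Notes on version B (the rewrite author's own statement) =====
-- stated objective: idiomatic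
-- what changed: Replaces the explicit scan over steps (with a redundant steps.index lookup per element) by a single bisect.bisect_right binary search minus one.
import Mathlib
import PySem

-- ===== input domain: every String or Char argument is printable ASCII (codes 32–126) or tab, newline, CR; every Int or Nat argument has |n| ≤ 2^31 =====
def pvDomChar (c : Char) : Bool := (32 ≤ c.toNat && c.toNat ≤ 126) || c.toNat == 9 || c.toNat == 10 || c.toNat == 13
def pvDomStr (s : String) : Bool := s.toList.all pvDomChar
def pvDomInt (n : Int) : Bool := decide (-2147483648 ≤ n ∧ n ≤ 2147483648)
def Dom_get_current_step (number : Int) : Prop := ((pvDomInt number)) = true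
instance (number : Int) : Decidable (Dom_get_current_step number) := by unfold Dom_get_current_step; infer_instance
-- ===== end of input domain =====

-- B replaces A's linear scan (with an index lookup per element) by one bisect_right binary search minus one.

-- ===== PORT A =====
def stepsA : List Int := [0, 5, 10, 50, 100, 500, 1000]

-- the for-loop of A: for each step, i = steps.index(step); early returns as Option
def pvALoop (number : Int) : List Int → Option Int
  | [] => none
  | step :: rest =>
    let i : Int := ((PySem.List.index? stepsA step).getD 0 : Nat)
    if step > number then some (i - 1)
    else if step == number then some i
    else pvALoop number rest

def get_current_step (number : Int) : Int :=
  (pvALoop number stepsA).getD ((stepsA.length : Int) - 1)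

-- ===== PORT B =====
def stepsB : List Int := [0, 5, 10, 50, 100, 500, 1000]

-- bisect.bisect_right, as CPython implements it: binary search on [lo, hi);
-- the while-loop is ported with fuel (hi - lo shrinks each turn, so `xs.length` fuel suffices)
def pvBRGo (xs : List Int) (x : Int) : Nat → Nat → Nat → Nat
  | 0, lo, _ => lo
  | fuel + 1, lo, hi =>
    if lo < hi then
      let mid := (lo + hi) / 2
      if x < xs.getD mid 0 then pvBRGo xs x fuel lo mid
      else pvBRGo xs x fuel (mid + 1) hi
    else lo

def get_current_step_alt (number : Int) : Int :=
  ((pvBRGo stepsB number stepsB.length 0 stepsB.length : Nat) : Int) - 1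

-- ===== PRECONDITION & SPEC =====
def Spec_get_current_step (number : Int) (out : Int) : Prop := out = get_current_step_alt number
instance (number : Int) (out : Int) : Decidable (Spec_get_current_step number out) := by unfold Spec_get_current_step; infer_instance

-- ===== CLAIM (what is proved, stated in full; the proofs are below) =====
def Claim_equal_get_current_step : Prop := ∀ (number : Int), Dom_get_current_step number → Spec_get_current_step number (get_current_step number)

-- ===== LEMMAS AND PROOFS =====

theorem pvB_eval (number : Int) :
    get_current_step_alt number =
      if number < 0 then -1 else if number < 5 then 0 else if number < 10 then 1
      else if number < 50 then 2 else if number < 100 then 3 else if number < 500 then 4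
      else if number < 1000 then 5 else 6 := by
  have bb : ∀ (xs : List Int) (f k : Nat), pvBRGo xs number f k k = k := by
    intro xs f k; cases f <;> simp [pvBRGo]
  have b01 : pvBRGo [0, 5, 10, 50, 100, 500, 1000] number 5 0 1 = (if number < 0 then 0 else 1) := by
    rw [show (5:Nat) = 4 + 1 from rfl, pvBRGo]
    norm_num [List.getD, bb]
  have b23 : pvBRGo [0, 5, 10, 50, 100, 500, 1000] number 5 2 3 = (if number < 10 then 2 else 3) := by
    rw [show (5:Nat) = 4 + 1 from rfl, pvBRGo]
    norm_num [List.getD, bb]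
  have b45 : pvBRGo [0, 5, 10, 50, 100, 500, 1000] number 5 4 5 = (if number < 100 then 4 else 5) := by
    rw [show (5:Nat) = 4 + 1 from rfl, pvBRGo]
    norm_num [List.getD, bb]
  have b67 : pvBRGo [0, 5, 10, 50, 100, 500, 1000] number 5 6 7 = (if number < 1000 then 6 else 7) := by
    rw [show (5:Nat) = 4 + 1 from rfl, pvBRGo]
    norm_num [List.getD, bb]
  have b03 : pvBRGo [0, 5, 10, 50, 100, 500, 1000] number 6 0 3 = (if number < 5 then (if number < 0 then 0 else 1) else (if number < 10 then 2 else 3)) := by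
    rw [show (6:Nat) = 5 + 1 from rfl, pvBRGo]
    norm_num [List.getD, bb, b01, b23]
  have b47 : pvBRGo [0, 5, 10, 50, 100, 500, 1000] number 6 4 7 = (if number < 500 then (if number < 100 then 4 else 5) else (if number < 1000 then 6 else 7)) := by
    rw [show (6:Nat) = 5 + 1 from rfl, pvBRGo]
    norm_num [List.getD, bb, b45, b67]
  have b07 : pvBRGo [0, 5, 10, 50, 100, 500, 1000] number 7 0 7 = (if number < 50 then (if number < 5 then (if number < 0 then 0 else 1) else (if number < 10 then 2 else 3)) else (if number < 500 then (if number < 100 then 4 else 5) else (if number < 1000 then 6 else 7))) := by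
    rw [show (7:Nat) = 6 + 1 from rfl, pvBRGo]
    norm_num [List.getD, bb, b03, b47]
  show ((pvBRGo stepsB number stepsB.length 0 stepsB.length : Nat) : Int) - 1 = _
  rw [show stepsB = [0, 5, 10, 50, 100, 500, 1000] from rfl, show List.length ([0, 5, 10, 50, 100, 500, 1000] : List Int) = 7 from rfl, b07]
  split_ifs <;> omega

set_option maxHeartbeats 1600000 in
theorem pvAB_eq (number : Int) : get_current_step number = get_current_step_alt number := by
  have h0 : ((((PySem.List.index? stepsA (0:Int)).getD 0 : Nat)) : Int) = 0 := by decide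
  have h1 : ((((PySem.List.index? stepsA (5:Int)).getD 0 : Nat)) : Int) = 1 := by decide
  have h2 : ((((PySem.List.index? stepsA (10:Int)).getD 0 : Nat)) : Int) = 2 := by decide
  have h3 : ((((PySem.List.index? stepsA (50:Int)).getD 0 : Nat)) : Int) = 3 := by decide
  have h4 : ((((PySem.List.index? stepsA (100:Int)).getD 0 : Nat)) : Int) = 4 := by decide
  have h5 : ((((PySem.List.index? stepsA (500:Int)).getD 0 : Nat)) : Int) = 5 := by decide
  have h6 : ((((PySem.List.index? stepsA (1000:Int)).getD 0 : Nat)) : Int) = 6 := by decide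
  rw [pvB_eval, get_current_step, show stepsA = [0, 5, 10, 50, 100, 500, 1000] from rfl]
  rcases (by omega : number < 0 ∨ number = 0 ∨ (0 < number ∧ number < 5) ∨ number = 5 ∨ (5 < number ∧ number < 10) ∨ number = 10 ∨ (10 < number ∧ number < 50) ∨ number = 50 ∨ (50 < number ∧ number < 100) ∨ number = 100 ∨ (100 < number ∧ number < 500) ∨ number = 500 ∨ (500 < number ∧ number < 1000) ∨ number = 1000 ∨ 1000 < number) with h|h|⟨ha, hb⟩|h|⟨ha, hb⟩|h|⟨ha, hb⟩|h|⟨ha, hb⟩|h|⟨ha, hb⟩|h|⟨ha, hb⟩|h|h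
  case _ =>
    rw [pvALoop]
    rw [if_pos (by omega : ((0:Int) > number))]
    rw [Option.getD_some, h0]
    split_ifs <;> omega
  case _ =>
    rw [h]
    rw [pvALoop, if_neg (by omega : ¬((0:Int) > (0:Int))), if_pos (by decide : (((0:Int) == (0:Int)) = true))]
    rw [Option.getD_some, h0]
    split_ifs <;> omega
  case _ =>
    rw [pvALoop]
    rw [if_neg (by omega : ¬((0:Int) > number)), if_neg (by simp only [beq_iff_eq]; omega : ¬(((0:Int) == number) = true))]
    rw [pvALoop, if_pos (by omega : ((5:Int) > number))]
    rw [Option.getD_some, h1]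
    split_ifs <;> omega
  case _ =>
    rw [h]
    rw [pvALoop]
    rw [if_neg (by omega : ¬((0:Int) > (5:Int))), if_neg (by simp only [beq_iff_eq]; omega : ¬(((0:Int) == (5:Int)) = true))]
    rw [pvALoop, if_neg (by omega : ¬((5:Int) > (5:Int))), if_pos (by decide : (((5:Int) == (5:Int)) = true))]
    rw [Option.getD_some, h1]
    split_ifs <;> omega
  case _ =>
    rw [pvALoop]
    rw [if_neg (by omega : ¬((0:Int) > number)), if_neg (by simp only [beq_iff_eq]; omega : ¬(((0:Int) == number) = true))]
    rw [pvALoop]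
    rw [if_neg (by omega : ¬((5:Int) > number)), if_neg (by simp only [beq_iff_eq]; omega : ¬(((5:Int) == number) = true))]
    rw [pvALoop, if_pos (by omega : ((10:Int) > number))]
    rw [Option.getD_some, h2]
    split_ifs <;> omega
  case _ =>
    rw [h]
    rw [pvALoop]
    rw [if_neg (by omega : ¬((0:Int) > (10:Int))), if_neg (by simp only [beq_iff_eq]; omega : ¬(((0:Int) == (10:Int)) = true))]
    rw [pvALoop]
    rw [if_neg (by omega : ¬((5:Int) > (10:Int))), if_neg (by simp only [beq_iff_eq]; omega : ¬(((5:Int) == (10:Int)) = true))]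
    rw [pvALoop, if_neg (by omega : ¬((10:Int) > (10:Int))), if_pos (by decide : (((10:Int) == (10:Int)) = true))]
    rw [Option.getD_some, h2]
    split_ifs <;> omega
  case _ =>
    rw [pvALoop]
    rw [if_neg (by omega : ¬((0:Int) > number)), if_neg (by simp only [beq_iff_eq]; omega : ¬(((0:Int) == number) = true))]
    rw [pvALoop]
    rw [if_neg (by omega : ¬((5:Int) > number)), if_neg (by simp only [beq_iff_eq]; omega : ¬(((5:Int) == number) = true))]
    rw [pvALoop]
    rw [if_neg (by omega : ¬((10:Int) > number)), if_neg (by simp only [beq_iff_eq]; omega : ¬(((10:Int) == number) = true))]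
    rw [pvALoop, if_pos (by omega : ((50:Int) > number))]
    rw [Option.getD_some, h3]
    split_ifs <;> omega
  case _ =>
    rw [h]
    rw [pvALoop]
    rw [if_neg (by omega : ¬((0:Int) > (50:Int))), if_neg (by simp only [beq_iff_eq]; omega : ¬(((0:Int) == (50:Int)) = true))]
    rw [pvALoop]
    rw [if_neg (by omega : ¬((5:Int) > (50:Int))), if_neg (by simp only [beq_iff_eq]; omega : ¬(((5:Int) == (50:Int)) = true))]
    rw [pvALoop]
    rw [if_neg (by omega : ¬((10:Int) > (50:Int))), if_neg (by simp only [beq_iff_eq]; omega : ¬(((10:Int) == (50:Int)) = true))]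
    rw [pvALoop, if_neg (by omega : ¬((50:Int) > (50:Int))), if_pos (by decide : (((50:Int) == (50:Int)) = true))]
    rw [Option.getD_some, h3]
    split_ifs <;> omega
  case _ =>
    rw [pvALoop]
    rw [if_neg (by omega : ¬((0:Int) > number)), if_neg (by simp only [beq_iff_eq]; omega : ¬(((0:Int) == number) = true))]
    rw [pvALoop]
    rw [if_neg (by omega : ¬((5:Int) > number)), if_neg (by simp only [beq_iff_eq]; omega : ¬(((5:Int) == number) = true))]
    rw [pvALoop]
    rw [if_neg (by omega : ¬((10:Int) > number)), if_neg (by simp only [beq_iff_eq]; omega : ¬(((10:Int) == number) = true))]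
    rw [pvALoop]
    rw [if_neg (by omega : ¬((50:Int) > number)), if_neg (by simp only [beq_iff_eq]; omega : ¬(((50:Int) == number) = true))]
    rw [pvALoop, if_pos (by omega : ((100:Int) > number))]
    rw [Option.getD_some, h4]
    split_ifs <;> omega
  case _ =>
    rw [h]
    rw [pvALoop]
    rw [if_neg (by omega : ¬((0:Int) > (100:Int))), if_neg (by simp only [beq_iff_eq]; omega : ¬(((0:Int) == (100:Int)) = true))]
    rw [pvALoop]
    rw [if_neg (by omega : ¬((5:Int) > (100:Int))), if_neg (by simp only [beq_iff_eq]; omega : ¬(((5:Int) == (100:Int)) = true))]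
    rw [pvALoop]
    rw [if_neg (by omega : ¬((10:Int) > (100:Int))), if_neg (by simp only [beq_iff_eq]; omega : ¬(((10:Int) == (100:Int)) = true))]
    rw [pvALoop]
    rw [if_neg (by omega : ¬((50:Int) > (100:Int))), if_neg (by simp only [beq_iff_eq]; omega : ¬(((50:Int) == (100:Int)) = true))]
    rw [pvALoop, if_neg (by omega : ¬((100:Int) > (100:Int))), if_pos (by decide : (((100:Int) == (100:Int)) = true))]
    rw [Option.getD_some, h4]
    split_ifs <;> omega
  case _ =>
    rw [pvALoop]
    rw [if_neg (by omega : ¬((0:Int) > number)), if_neg (by simp only [beq_iff_eq]; omega : ¬(((0:Int) == number) = true))]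
    rw [pvALoop]
    rw [if_neg (by omega : ¬((5:Int) > number)), if_neg (by simp only [beq_iff_eq]; omega : ¬(((5:Int) == number) = true))]
    rw [pvALoop]
    rw [if_neg (by omega : ¬((10:Int) > number)), if_neg (by simp only [beq_iff_eq]; omega : ¬(((10:Int) == number) = true))]
    rw [pvALoop]
    rw [if_neg (by omega : ¬((50:Int) > number)), if_neg (by simp only [beq_iff_eq]; omega : ¬(((50:Int) == number) = true))]
    rw [pvALoop]
    rw [if_neg (by omega : ¬((100:Int) > number)), if_neg (by simp only [beq_iff_eq]; omega : ¬(((100:Int) == number) = true))]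
    rw [pvALoop, if_pos (by omega : ((500:Int) > number))]
    rw [Option.getD_some, h5]
    split_ifs <;> omega
  case _ =>
    rw [h]
    rw [pvALoop]
    rw [if_neg (by omega : ¬((0:Int) > (500:Int))), if_neg (by simp only [beq_iff_eq]; omega : ¬(((0:Int) == (500:Int)) = true))]
    rw [pvALoop]
    rw [if_neg (by omega : ¬((5:Int) > (500:Int))), if_neg (by simp only [beq_iff_eq]; omega : ¬(((5:Int) == (500:Int)) = true))]
    rw [pvALoop]
    rw [if_neg (by omega : ¬((10:Int) > (500:Int))), if_neg (by simp only [beq_iff_eq]; omega : ¬(((10:Int) == (500:Int)) = true))]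
    rw [pvALoop]
    rw [if_neg (by omega : ¬((50:Int) > (500:Int))), if_neg (by simp only [beq_iff_eq]; omega : ¬(((50:Int) == (500:Int)) = true))]
    rw [pvALoop]
    rw [if_neg (by omega : ¬((100:Int) > (500:Int))), if_neg (by simp only [beq_iff_eq]; omega : ¬(((100:Int) == (500:Int)) = true))]
    rw [pvALoop, if_neg (by omega : ¬((500:Int) > (500:Int))), if_pos (by decide : (((500:Int) == (500:Int)) = true))]
    rw [Option.getD_some, h5]
    split_ifs <;> omega
  case _ =>
    rw [pvALoop]
    rw [if_neg (by omega : ¬((0:Int) > number)), if_neg (by simp only [beq_iff_eq]; omega : ¬(((0:Int) == number) = true))]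
    rw [pvALoop]
    rw [if_neg (by omega : ¬((5:Int) > number)), if_neg (by simp only [beq_iff_eq]; omega : ¬(((5:Int) == number) = true))]
    rw [pvALoop]
    rw [if_neg (by omega : ¬((10:Int) > number)), if_neg (by simp only [beq_iff_eq]; omega : ¬(((10:Int) == number) = true))]
    rw [pvALoop]
    rw [if_neg (by omega : ¬((50:Int) > number)), if_neg (by simp only [beq_iff_eq]; omega : ¬(((50:Int) == number) = true))]
    rw [pvALoop]
    rw [if_neg (by omega : ¬((100:Int) > number)), if_neg (by simp only [beq_iff_eq]; omega : ¬(((100:Int) == number) = true))]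
    rw [pvALoop]
    rw [if_neg (by omega : ¬((500:Int) > number)), if_neg (by simp only [beq_iff_eq]; omega : ¬(((500:Int) == number) = true))]
    rw [pvALoop, if_pos (by omega : ((1000:Int) > number))]
    rw [Option.getD_some, h6]
    split_ifs <;> omega
  case _ =>
    rw [h]
    rw [pvALoop]
    rw [if_neg (by omega : ¬((0:Int) > (1000:Int))), if_neg (by simp only [beq_iff_eq]; omega : ¬(((0:Int) == (1000:Int)) = true))]
    rw [pvALoop]
    rw [if_neg (by omega : ¬((5:Int) > (1000:Int))), if_neg (by simp only [beq_iff_eq]; omega : ¬(((5:Int) == (1000:Int)) = true))]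
    rw [pvALoop]
    rw [if_neg (by omega : ¬((10:Int) > (1000:Int))), if_neg (by simp only [beq_iff_eq]; omega : ¬(((10:Int) == (1000:Int)) = true))]
    rw [pvALoop]
    rw [if_neg (by omega : ¬((50:Int) > (1000:Int))), if_neg (by simp only [beq_iff_eq]; omega : ¬(((50:Int) == (1000:Int)) = true))]
    rw [pvALoop]
    rw [if_neg (by omega : ¬((100:Int) > (1000:Int))), if_neg (by simp only [beq_iff_eq]; omega : ¬(((100:Int) == (1000:Int)) = true))]
    rw [pvALoop]
    rw [if_neg (by omega : ¬((500:Int) > (1000:Int))), if_neg (by simp only [beq_iff_eq]; omega : ¬(((500:Int) == (1000:Int)) = true))]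
    rw [pvALoop, if_neg (by omega : ¬((1000:Int) > (1000:Int))), if_pos (by decide : (((1000:Int) == (1000:Int)) = true))]
    rw [Option.getD_some, h6]
    split_ifs <;> omega
  case _ =>
    rw [pvALoop]
    rw [if_neg (by omega : ¬((0:Int) > number)), if_neg (by simp only [beq_iff_eq]; omega : ¬(((0:Int) == number) = true))]
    rw [pvALoop]
    rw [if_neg (by omega : ¬((5:Int) > number)), if_neg (by simp only [beq_iff_eq]; omega : ¬(((5:Int) == number) = true))]
    rw [pvALoop]
    rw [if_neg (by omega : ¬((10:Int) > number)), if_neg (by simp only [beq_iff_eq]; omega : ¬(((10:Int) == number) = true))]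
    rw [pvALoop]
    rw [if_neg (by omega : ¬((50:Int) > number)), if_neg (by simp only [beq_iff_eq]; omega : ¬(((50:Int) == number) = true))]
    rw [pvALoop]
    rw [if_neg (by omega : ¬((100:Int) > number)), if_neg (by simp only [beq_iff_eq]; omega : ¬(((100:Int) == number) = true))]
    rw [pvALoop]
    rw [if_neg (by omega : ¬((500:Int) > number)), if_neg (by simp only [beq_iff_eq]; omega : ¬(((500:Int) == number) = true))]
    rw [pvALoop]
    rw [if_neg (by omega : ¬((1000:Int) > number)), if_neg (by simp only [beq_iff_eq]; omega : ¬(((1000:Int) == number) = true))]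
    rw [pvALoop, Option.getD_none]
    simp only [List.length_cons, List.length_nil]
    split_ifs <;> omega

-- ===== VERDICT (by name: the statement is the Claim_ definition above) =====
theorem get_current_step_spec : Claim_equal_get_current_step := by
  intro number _
  unfold Spec_get_current_step
  exact pvAB_eq number
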